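-- pv_equiv track=rewrite | github.com/Magdalena-Bigaj/some_kata_from_codewars | some_codewars.py | solomons_quest
-- ===== SOURCE A (Python) =====
-- def solomons_quest(coordinates):
--     a = 0
--     b = 0
--     location = [a, b]
--     direction_unpack = {0: 1, 1: 1, 2: -1, 3: -1}
--     previous_dilation = 0
--     for coordinate in coordinates:
--         dilation = coordinate[0]
--         direction = coordinate[1]
--         distance = coordinate[2]
--         distance = distance * 2 ** (dilation + previous_dilation)
--         previous_dilation = previous_dilation + dilation
--         if direction == 1 or direction == 3:
--             a += distance * direction_unpack[direction]
--         else: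
--             b += distance * direction_unpack[direction]
--         location = [a, b]
--     return location
-- ===== SOURCE B (Python) =====
-- def solomons_quest(coordinates):
--     # table of inclusive cumulative dilations, then two separate shaped passes
--     cum = []
--     total = 0
--     for c in coordinates:
--         total += c[0]
--         cum.append(total)
--     signs = {0: 1, 1: 1, 2: -1, 3: -1}
--     terms = [(c[1], c[2] * 2 ** d * signs[c[1]]) for c, d in zip(coordinates, cum)]
--     a = sum(v for k, v in terms if k in (1, 3))
--     b = sum(v for k, v in terms if k in (0, 2))
--     return [a, b]
-- ===== Notes on version B (the rewrite author's own statement) =====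
-- stated objective: alternative
-- what changed: Replaces A's single fused loop carrying (a, b, previous_dilation) state with a table-then-passes decomposition: first build the inclusive cumulative-dilation table and a list of (direction, signed term) pairs via a signs table, then sum each axis in a separate filtered pass.
-- outside the precondition, e.g. on solomons_quest([[-2, 0, 3]]): A returns [0, 0.75], B returns [0, 0.75]
import Mathlib
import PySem

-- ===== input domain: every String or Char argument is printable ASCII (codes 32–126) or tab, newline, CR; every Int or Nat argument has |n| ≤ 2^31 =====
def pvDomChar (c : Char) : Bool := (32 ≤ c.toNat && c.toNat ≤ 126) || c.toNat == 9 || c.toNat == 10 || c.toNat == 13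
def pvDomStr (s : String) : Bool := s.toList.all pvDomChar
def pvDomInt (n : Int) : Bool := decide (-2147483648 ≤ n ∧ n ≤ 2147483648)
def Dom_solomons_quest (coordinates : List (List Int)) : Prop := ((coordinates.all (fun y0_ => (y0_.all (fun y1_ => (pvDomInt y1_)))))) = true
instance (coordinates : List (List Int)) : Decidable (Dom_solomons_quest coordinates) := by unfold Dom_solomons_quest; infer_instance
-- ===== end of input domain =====

-- B replaces A's single fused loop by a table-then-passes decomposition (inclusive
-- cumulative-dilation table, then two separate filtered signed sums); same O(n) cost.

-- ===== PORT A =====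
-- A's fused loop: state (a, b, previous_dilation), dict-driven sign.
def solomons_quest (coordinates : List (List Int)) : List Int :=
  let direction_unpack : PySem.Dict Int Int := PySem.Dict.ofList [(0, 1), (1, 1), (2, -1), (3, -1)]
  let r := coordinates.foldl (fun st coordinate =>
    let a := st.1
    let b := st.2.1
    let previous_dilation := st.2.2
    let dilation := (PySem.List.pyGet? coordinate 0).getD 0
    let direction := (PySem.List.pyGet? coordinate 1).getD 0
    let distance := (PySem.List.pyGet? coordinate 2).getD 0
    -- Python: distance * 2 ** (dilation + previous_dilation); exact for a nonnegative
    -- exponent (guaranteed by Pre_); Python yields a float on a negative exponent.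
    let distance := distance * 2 ^ (dilation + previous_dilation).toNat
    let previous_dilation := previous_dilation + dilation
    if direction == 1 || direction == 3 then
      (a + distance * (direction_unpack.getD direction 0), b, previous_dilation)
    else
      -- Python raises KeyError here when direction ∉ {0, 2}; excluded by Pre_.
      (a, b + distance * (direction_unpack.getD direction 0), previous_dilation))
    ((0 : Int), (0 : Int), (0 : Int))
  [r.1, r.2.1]

-- ===== PORT B =====
-- table of inclusive cumulative dilations (running total, one entry per coordinate)
def pvCumDil : List (List Int) → Int → List Int
  | [], _ => []
  | c :: rest, total =>
    let t := total + (PySem.List.pyGet? c 0).getD 0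
    t :: pvCumDil rest t

def solomons_quest_alt (coordinates : List (List Int)) : List Int :=
  let cum := pvCumDil coordinates 0
  let signs : PySem.Dict Int Int := PySem.Dict.ofList [(0, 1), (1, 1), (2, -1), (3, -1)]
  -- signs[c[1]]: Python raises KeyError for a direction outside {0,1,2,3} (outside Pre_)
  let terms := (coordinates.zip cum).map (fun p =>
    ((PySem.List.pyGet? p.1 1).getD 0,
     (PySem.List.pyGet? p.1 2).getD 0 * 2 ^ p.2.toNat *
       signs.getD ((PySem.List.pyGet? p.1 1).getD 0) 0))
  let a := ((terms.filter (fun q => q.1 == 1 || q.1 == 3)).map (fun q => q.2)).sum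
  let b := ((terms.filter (fun q => q.1 == 0 || q.1 == 2)).map (fun q => q.2)).sum
  [a, b]

-- ===== PRECONDITION & SPEC =====
-- Pre_ excludes exactly the inputs on which Python A does not return a list of ints:
-- a coordinate shorter than 3 (IndexError), a direction outside {0,1,2,3} (KeyError in
-- the else branch), and a negative inclusive cumulative dilation, where 2**negative
-- makes Python A return floats rather than ints (B returns the same floats there).
def Pre_solomons_quest (coordinates : List (List Int)) : Prop :=
  (∀ c ∈ coordinates, 3 ≤ c.length ∧ ((PySem.List.pyGet? c 1).getD 0) ∈ ([0, 1, 2, 3] : List Int)) ∧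
  (∀ k < coordinates.length,
    0 ≤ ((coordinates.take (k + 1)).map (fun c => (PySem.List.pyGet? c 0).getD 0)).sum)
instance (coordinates : List (List Int)) : Decidable (Pre_solomons_quest coordinates) := by
  unfold Pre_solomons_quest; infer_instance

def pvWitness_solomons_quest : List (List Int) := [[2, 1, 3], [0, 0, 5], [-1, 2, 4], [0, 3, 2]]

def Spec_solomons_quest (coordinates : List (List Int)) (out : List Int) : Prop := out = solomons_quest_alt coordinates
instance (coordinates : List (List Int)) (out : List Int) : Decidable (Spec_solomons_quest coordinates out) := by unfold Spec_solomons_quest; infer_instance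

-- ===== CLAIM (what is proved, stated in full; the proofs are below) =====
def Claim_equal_solomons_quest : Prop := ∀ (coordinates : List (List Int)), Dom_solomons_quest coordinates → Pre_solomons_quest coordinates → Spec_solomons_quest coordinates (solomons_quest coordinates)

-- ===== LEMMAS AND PROOFS =====

-- the value A's dict lookup yields for an arbitrary key
lemma pv_dict_val (d : Int) :
    (PySem.Dict.ofList [((0:Int),(1:Int)),(1,1),(2,-1),(3,-1)]).getD d 0
      = if d == 0 then 1 else if d == 1 then 1 else if d == 2 then -1 else if d == 3 then -1 else 0 := by
  have h : PySem.Dict.ofList [((0:Int),(1:Int)),(1,1),(2,-1),(3,-1)]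
      = PySem.Dict.mk [((0:Int),(1:Int)),(1,1),(2,-1),(3,-1)] := by decide
  rw [h, PySem.Dict.getD]
  simp only [PySem.Dict.get?_mk_cons, beq_iff_eq]
  split_ifs <;> first | rfl | (exfalso; omega)

-- one step of a filtered mapped sum
lemma pv_filtmap_cons {A : Type} (P : A → Bool) (f : A → Int) (x : A) (l : List A) :
    ((List.filter P (x :: l)).map f).sum
      = (if P x then f x else 0) + ((List.filter P l).map f).sum := by
  by_cases h : P x = true <;> simp [h]

-- B's two passes, abstracted over the starting running total t (the loop invariant)
def pvTerms (coords : List (List Int)) (t : Int) : List (Int × Int) :=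
  (coords.zip (pvCumDil coords t)).map (fun p =>
    ((PySem.List.pyGet? p.1 1).getD 0,
     (PySem.List.pyGet? p.1 2).getD 0 * 2 ^ p.2.toNat *
       (PySem.Dict.ofList [((0:Int), (1:Int)), (1, 1), (2, -1), (3, -1)]).getD
         ((PySem.List.pyGet? p.1 1).getD 0) 0))

def pvSumA (coords : List (List Int)) (t : Int) : Int :=
  (((pvTerms coords t).filter (fun q => q.1 == 1 || q.1 == 3)).map (fun q => q.2)).sum

def pvSumB (coords : List (List Int)) (t : Int) : Int :=
  (((pvTerms coords t).filter (fun q => q.1 == 0 || q.1 == 2)).map (fun q => q.2)).sum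

def pvCumTot (coords : List (List Int)) : Int :=
  (coords.map (fun c => (PySem.List.pyGet? c 0).getD 0)).sum

-- A's fold from any start state equals start + B's two abstracted passes
lemma pv_fold_eq (coords : List (List Int)) : ∀ (a b t : Int),
    coords.foldl (fun st coordinate =>
      let a := st.1
      let b := st.2.1
      let previous_dilation := st.2.2
      let dilation := (PySem.List.pyGet? coordinate 0).getD 0
      let direction := (PySem.List.pyGet? coordinate 1).getD 0
      let distance := (PySem.List.pyGet? coordinate 2).getD 0
      let distance := distance * 2 ^ (dilation + previous_dilation).toNat
      let previous_dilation := previous_dilation + dilation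
      if direction == 1 || direction == 3 then
        (a + distance * ((PySem.Dict.ofList [((0:Int),(1:Int)),(1,1),(2,-1),(3,-1)]).getD direction 0), b, previous_dilation)
      else
        (a, b + distance * ((PySem.Dict.ofList [((0:Int),(1:Int)),(1,1),(2,-1),(3,-1)]).getD direction 0), previous_dilation))
      (a, b, t)
    = (a + pvSumA coords t, b + pvSumB coords t, t + pvCumTot coords) := by
  induction coords with
  | nil => intro a b t; simp [pvSumA, pvSumB, pvTerms, pvCumDil, pvCumTot]
  | cons c rest ih =>
    intro a b t
    simp only [List.foldl_cons]
    have hterms : pvTerms (c :: rest) t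
        = ((PySem.List.pyGet? c 1).getD 0,
           (PySem.List.pyGet? c 2).getD 0 * 2 ^ (t + (PySem.List.pyGet? c 0).getD 0).toNat *
             (PySem.Dict.ofList [((0:Int), (1:Int)), (1, 1), (2, -1), (3, -1)]).getD
               ((PySem.List.pyGet? c 1).getD 0) 0)
          :: pvTerms rest (t + (PySem.List.pyGet? c 0).getD 0) := rfl
    have hAexp : pvSumA (c :: rest) t
        = (if ((PySem.List.pyGet? c 1).getD 0 == 1 || (PySem.List.pyGet? c 1).getD 0 == 3)
            then (PySem.List.pyGet? c 2).getD 0 * 2 ^ (t + (PySem.List.pyGet? c 0).getD 0).toNat *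
              (PySem.Dict.ofList [((0:Int), (1:Int)), (1, 1), (2, -1), (3, -1)]).getD
                ((PySem.List.pyGet? c 1).getD 0) 0 else 0)
          + pvSumA rest (t + (PySem.List.pyGet? c 0).getD 0) := by
      unfold pvSumA
      rw [hterms, pv_filtmap_cons]
    have hBexp : pvSumB (c :: rest) t
        = (if ((PySem.List.pyGet? c 1).getD 0 == 0 || (PySem.List.pyGet? c 1).getD 0 == 2)
            then (PySem.List.pyGet? c 2).getD 0 * 2 ^ (t + (PySem.List.pyGet? c 0).getD 0).toNat *
              (PySem.Dict.ofList [((0:Int), (1:Int)), (1, 1), (2, -1), (3, -1)]).getD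
                ((PySem.List.pyGet? c 1).getD 0) 0 else 0)
          + pvSumB rest (t + (PySem.List.pyGet? c 0).getD 0) := by
      unfold pvSumB
      rw [hterms, pv_filtmap_cons]
    have htot : pvCumTot (c :: rest) = (PySem.List.pyGet? c 0).getD 0 + pvCumTot rest := by
      simp [pvCumTot]
    rw [hAexp, hBexp, htot]
    have hexp : ((PySem.List.pyGet? c 0).getD 0 + t).toNat
        = (t + (PySem.List.pyGet? c 0).getD 0).toNat := by omega
    by_cases h1 : ((PySem.List.pyGet? c 1).getD 0 == 1 || (PySem.List.pyGet? c 1).getD 0 == 3) = true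
    · have hB0 : ((PySem.List.pyGet? c 1).getD 0 == 0 || (PySem.List.pyGet? c 1).getD 0 == 2) = false := by
        rcases Bool.or_eq_true _ _ |>.mp h1 with h | h <;> rw [beq_iff_eq] at h <;> simp [h]
      simp only [h1, hB0, if_true, Bool.false_eq_true, if_false, hexp]
      rw [ih]
      refine Prod.ext ?_ (Prod.ext ?_ ?_) <;> simp <;> ring
    · simp only [h1, Bool.false_eq_true, if_false]
      rw [ih]
      by_cases h0 : ((PySem.List.pyGet? c 1).getD 0 == 0 || (PySem.List.pyGet? c 1).getD 0 == 2) = true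
      · simp only [h0, if_true, hexp]
        refine Prod.ext ?_ (Prod.ext ?_ ?_) <;> simp <;> ring
      · -- direction outside {0,1,2,3}: A's and B's lookup default is 0; both add nothing
        have hz : (PySem.Dict.ofList [((0:Int),(1:Int)),(1,1),(2,-1),(3,-1)]).getD
            ((PySem.List.pyGet? c 1).getD 0) 0 = 0 := by
          rw [pv_dict_val]
          simp only [Bool.not_eq_true, Bool.or_eq_false_iff, beq_eq_false_iff_ne] at h1 h0
          simp [h0.1, h1.1, h0.2, h1.2]
        simp only [h0, Bool.false_eq_true, if_false, hz, mul_zero, add_zero, zero_add]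
        refine Prod.ext ?_ (Prod.ext ?_ ?_) <;> first | (simp; ring) | simp

-- ===== VERDICT (by name: the statement is the Claim_ definition above) =====
theorem solomons_quest_spec : Claim_equal_solomons_quest := by
  intro coordinates _ _
  unfold Spec_solomons_quest
  simp only [solomons_quest, solomons_quest_alt]
  rw [pv_fold_eq]
  simp [pvSumA, pvSumB, pvTerms]
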